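-- pv_equiv track=rewrite | github.com/bennycraig/leetcode-and-pramp | pramp/12-bracket-match.py | bracket_match
-- ===== SOURCE A (Python) =====
-- def bracket_match(text):
--   left = 0
--   right = 0
--
--   for c in text:
--     # see left bracket
--     if c == '(':
--       left += 1
--     # see right bracket
--     else:
--       if left == 0:
--         right += 1
--       else:
--         left -= 1
--
--   return left + right
-- ===== SOURCE B (Python) =====
-- def bracket_match(text):
--   # scan right-to-left over the suffixes: bal = sum of +/-1 deltas of the
--   # suffix, lo = minimum prefix-sum of the suffix (including the empty one)
--   bal = 0
--   lo = 0
--   for c in reversed(text):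
--     d = 1 if c == '(' else -1
--     bal = d + bal
--     lo = min(0, d + lo)
--   return bal - 2 * lo
-- ===== Notes on version B (the rewrite author's own statement) =====
-- stated objective: alternative
-- what changed: Replaces A's left-to-right branchy left/right counter pair with a right-to-left scan over suffixes maintaining the suffix balance and its minimum prefix-sum, returning the closed form bal - 2*lo.
import Mathlib
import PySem

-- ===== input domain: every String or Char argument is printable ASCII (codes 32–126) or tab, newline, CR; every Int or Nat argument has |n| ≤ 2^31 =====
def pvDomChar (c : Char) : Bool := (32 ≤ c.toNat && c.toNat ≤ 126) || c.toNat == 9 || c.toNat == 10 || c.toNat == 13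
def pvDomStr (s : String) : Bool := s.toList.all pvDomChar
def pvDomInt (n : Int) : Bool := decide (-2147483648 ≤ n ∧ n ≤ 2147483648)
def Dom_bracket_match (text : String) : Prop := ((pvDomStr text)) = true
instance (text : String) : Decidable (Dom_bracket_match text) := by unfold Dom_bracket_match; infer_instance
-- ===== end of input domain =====

-- B replaces A's left-to-right branchy left/right counters with a right-to-left scan
-- maintaining the suffix balance and its minimum prefix-sum (alternative decomposition, same cost).

-- ===== PORT A =====
def bracket_match (text : String) : Int :=
  let s := text.toList.foldl (fun (s : Int × Int) c =>
    if c = '(' then (s.1 + 1, s.2)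
    else if s.1 = 0 then (s.1, s.2 + 1)
    else (s.1 - 1, s.2)) (0, 0)
  s.1 + s.2

-- ===== PORT B =====
def bracket_match_alt (text : String) : Int :=
  let s := text.toList.foldr (fun c (s : Int × Int) =>
    let d : Int := if c = '(' then 1 else -1
    (d + s.1, min 0 (d + s.2))) (0, 0)
  s.1 - 2 * s.2

-- ===== PRECONDITION & SPEC =====
def Spec_bracket_match (text : String) (out : Int) : Prop := out = bracket_match_alt text
instance (text : String) (out : Int) : Decidable (Spec_bracket_match text out) := by unfold Spec_bracket_match; infer_instance

-- ===== CLAIM (what is proved, stated in full; the proofs are below) =====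
def Claim_equal_bracket_match : Prop := ∀ (text : String), Dom_bracket_match text → Spec_bracket_match text (bracket_match text)

-- ===== LEMMAS AND PROOFS =====

-- abbreviation for B's foldr step state, used only by the proofs below
def bmStep (c : Char) (s : Int × Int) : Int × Int :=
  let d : Int := if c = '(' then 1 else -1
  (d + s.1, min 0 (d + s.2))

lemma bmStep_lo_nonpos (l : List Char) : (l.foldr bmStep (0, 0)).2 ≤ 0 := by
  induction l with
  | nil => simp
  | cons c l ih => simp only [List.foldr_cons, bmStep]; omega

-- A's left-to-right fold from any state (left, right) with 0 ≤ left, expressed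
-- through B's suffix quantities (bal, lo) = foldr bmStep (0,0).
lemma bracket_fold_eq (l : List Char) : ∀ (left right : Int), 0 ≤ left →
    (l.foldl (fun (s : Int × Int) c =>
      if c = '(' then (s.1 + 1, s.2)
      else if s.1 = 0 then (s.1, s.2 + 1)
      else (s.1 - 1, s.2)) (left, right))
    = (left + (l.foldr bmStep (0, 0)).1 - min 0 (left + (l.foldr bmStep (0, 0)).2),
       right - min 0 (left + (l.foldr bmStep (0, 0)).2)) := by
  induction l with
  | nil => intro left right h; simp; omega
  | cons c l ih =>
    intro left right h
    have hlo := bmStep_lo_nonpos l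
    simp only [List.foldl_cons, List.foldr_cons]
    by_cases hc : c = '('
    · rw [if_pos hc, ih (left + 1) right (by omega)]
      simp only [bmStep, if_pos hc]
      simp only [Prod.mk.injEq]; omega
    · rw [if_neg hc]
      by_cases hz : left = 0
      · rw [if_pos hz, ih left (right + 1) h]
        simp only [bmStep, if_neg hc]
        subst hz
        simp only [Prod.mk.injEq]; omega
      · rw [if_neg hz, ih (left - 1) right (by omega)]
        simp only [bmStep, if_neg hc]
        simp only [Prod.mk.injEq]; omega

-- ===== VERDICT (by name: the statement is the Claim_ definition above) =====
theorem bracket_match_spec : Claim_equal_bracket_match := by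
  intro text _
  unfold Spec_bracket_match bracket_match bracket_match_alt
  rw [show (fun c (s : Int × Int) =>
      let d : Int := if c = '(' then 1 else -1
      (d + s.1, min 0 (d + s.2))) = bmStep from rfl]
  have h := bracket_fold_eq text.toList 0 0 le_rfl
  have hlo := bmStep_lo_nonpos text.toList
  rw [h]
  dsimp only
  omega
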